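-- pv_equiv track=rewrite | github.com/pypi-data/pypi-mirror-369 | packages/connpy/connpy-4.2.tar.gz/connpy-4.2/connpy/printer.py | _format_multiline
-- ===== SOURCE A (Python) =====
-- def _format_multiline(tag, message):
--     lines = message.splitlines()
--     if not lines:
--         return f"[{tag}]"
--     formatted = [f"[{tag}] {lines[0]}"]
--     indent = " " * (len(tag) + 3)
--     for line in lines[1:]:
--         formatted.append(f"{indent}{line}")
--     return "\n".join(formatted)
-- ===== SOURCE B (Python) =====
-- def _format_multiline(tag, message):
--     if not message:
--         return f"[{tag}]"
--     out = [f"[{tag}] "]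
--     sep = "\n" + " " * (len(tag) + 3)
--     i, n = 0, len(message)
--     while i < n:
--         c = message[i]
--         if c == "\r":
--             i += 2 if i + 1 < n and message[i + 1] == "\n" else 1
--             if i < n:
--                 out.append(sep)
--         elif c == "\n":
--             i += 1
--             if i < n:
--                 out.append(sep)
--         else:
--             out.append(c)
--             i += 1
--     return "".join(out)
-- ===== Notes on version B (the rewrite author's own statement) =====
-- stated objective: alternative
-- what changed: A splits the message into lines and rebuilds them with a formatted list and a join; B never splits: it streams over the characters once with an index-based state machine, emitting the newline+indent separator at each line break ('\n', '\r', '\r\n') that is not at the end of the string.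
import Mathlib
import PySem

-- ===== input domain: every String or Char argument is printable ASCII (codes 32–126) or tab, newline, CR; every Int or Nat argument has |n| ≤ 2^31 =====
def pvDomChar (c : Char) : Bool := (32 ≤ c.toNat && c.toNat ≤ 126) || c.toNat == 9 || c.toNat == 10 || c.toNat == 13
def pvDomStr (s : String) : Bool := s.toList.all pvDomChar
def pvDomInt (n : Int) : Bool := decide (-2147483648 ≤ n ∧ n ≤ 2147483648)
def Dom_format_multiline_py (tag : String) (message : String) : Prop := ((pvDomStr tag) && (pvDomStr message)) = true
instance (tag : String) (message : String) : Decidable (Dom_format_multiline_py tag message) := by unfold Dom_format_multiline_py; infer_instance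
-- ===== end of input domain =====

-- B replaces A's split-into-lines / rebuild-and-join by a single character-level scan that
-- emits newline+indent at each line break not at the end of the string (objective: alternative).

-- ===== PORT A =====
def format_multiline_py (tag : String) (message : String) : String :=
  let lines := PySem.Chars.splitlines message.toList
  if lines = [] then
    String.ofList ('[' :: tag.toList ++ [']'])
  else
    let formatted : List (List Char) := ['[' :: tag.toList ++ [']', ' '] ++ lines.headD []]
    let indent := List.replicate (tag.toList.length + 3) ' '
    let formatted := (lines.drop 1).foldl (fun acc line => acc ++ [indent ++ line]) formatted
    String.ofList (PySem.Chars.join ['\n'] formatted)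

-- ===== PORT B =====
-- B's while-loop over the character index, as structural recursion on the remaining characters;
-- '\r\n' consumes two characters, and a break at the very end emits nothing.
def pvBLoop (sep : List Char) : List Char → List Char
  | [] => []
  | '\r' :: '\n' :: rest => (if rest = [] then [] else sep) ++ pvBLoop sep rest
  | '\r' :: rest => (if rest = [] then [] else sep) ++ pvBLoop sep rest
  | '\n' :: rest => (if rest = [] then [] else sep) ++ pvBLoop sep rest
  | c :: rest => c :: pvBLoop sep rest

def format_multiline_py_alt (tag : String) (message : String) : String :=
  if message.toList = [] then
    String.ofList ('[' :: tag.toList ++ [']'])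
  else
    let sep := '\n' :: List.replicate (tag.toList.length + 3) ' '
    String.ofList (('[' :: tag.toList ++ [']', ' ']) ++ pvBLoop sep message.toList)

-- ===== PRECONDITION & SPEC =====
def Spec_format_multiline_py (tag : String) (message : String) (out : String) : Prop := out = format_multiline_py_alt tag message
instance (tag : String) (message : String) (out : String) : Decidable (Spec_format_multiline_py tag message out) := by unfold Spec_format_multiline_py; infer_instance

-- ===== CLAIM (what is proved, stated in full; the proofs are below) =====
def Claim_equal_format_multiline_py : Prop := ∀ (tag : String) (message : String), Dom_format_multiline_py tag message → Spec_format_multiline_py tag message (format_multiline_py tag message)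

-- ===== LEMMAS AND PROOFS =====

theorem pv_char_toNat_inj (a b : Char) (h : a.toNat = b.toNat) : a = b := by
  have ha := Char.ofNat_toNat a
  have hb := Char.ofNat_toNat b
  rw [h] at ha
  exact ha.symm.trans hb

-- On dom characters, splitlines' break test agrees with "is '\n' or '\r'".
theorem pv_isB_dom (c : Char) (h : pvDomChar c = true) :
    (decide (c.toNat = 10) || decide (c.toNat = 13) || decide (c.toNat = 11) || decide (c.toNat = 12) ||
     decide (c.toNat = 28) || decide (c.toNat = 29) || decide (c.toNat = 30) || decide (c.toNat = 133) ||
     decide (c.toNat = 8232) || decide (c.toNat = 8233)) = (c == '\n' || c == '\r') := by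
  have hd : (32 ≤ c.toNat ∧ c.toNat ≤ 126) ∨ c.toNat = 9 ∨ c.toNat = 10 ∨ c.toNat = 13 := by
    simp [pvDomChar] at h
    omega
  by_cases h10 : c.toNat = 10
  · have : c = '\n' := pv_char_toNat_inj c '\n' (by rw [h10]; rfl)
    subst this; decide
  by_cases h13 : c.toNat = 13
  · have : c = '\r' := pv_char_toNat_inj c '\r' (by rw [h13]; rfl)
    subst this; decide
  have e1 : (c == '\n') = false := by
    simp only [beq_eq_false_iff_ne, ne_eq]
    intro hc; subst hc; exact h10 rfl
  have e2 : (c == '\r') = false := by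
    simp only [beq_eq_false_iff_ne, ne_eq]
    intro hc; subst hc; exact h13 rfl
  have hrest : c.toNat ≠ 11 ∧ c.toNat ≠ 12 ∧ c.toNat ≠ 28 ∧ c.toNat ≠ 29 ∧ c.toNat ≠ 30 ∧
      c.toNat ≠ 133 ∧ c.toNat ≠ 8232 ∧ c.toNat ≠ 8233 := by omega
  simp [e1, e2, h10, h13, hrest.1, hrest.2.1, hrest.2.2.1, hrest.2.2.2.1,
    hrest.2.2.2.2.1, hrest.2.2.2.2.2.1, hrest.2.2.2.2.2.2.1, hrest.2.2.2.2.2.2.2]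

-- splitlines.go flushes its accumulator of finished lines in front of the rest.
theorem pv_go_acc (isB : Char → Bool) :
    ∀ (cs cur : List Char) (acc : List (List Char)),
      PySem.Chars.splitlines.go isB cs cur acc =
        acc.reverse ++ PySem.Chars.splitlines.go isB cs cur [] := by
  intro cs cur₀ acc₀
  refine PySem.Chars.splitlines.go.induct isB
    (motive := fun cs _ _ => ∀ cur acc, PySem.Chars.splitlines.go isB cs cur acc =
      acc.reverse ++ PySem.Chars.splitlines.go isB cs cur []) ?_ ?_ ?_ ?_ ?_ cs [] [] cur₀ acc₀
  · intro _ _ _ cur acc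
    by_cases h : cur.isEmpty <;> simp [PySem.Chars.splitlines.go.eq_1, h]
  · intro _ _ _ cur acc
    by_cases h : cur.isEmpty <;> simp [PySem.Chars.splitlines.go.eq_1, h]
  · intro rest _ _ ih cur acc
    rw [PySem.Chars.splitlines.go.eq_2, PySem.Chars.splitlines.go.eq_2, ih, ih [] [cur.reverse]]
    simp
  · intro c rest _ _ hside hB ih cur acc
    rw [PySem.Chars.splitlines.go.eq_3 _ _ _ _ _ hside, PySem.Chars.splitlines.go.eq_3 _ _ _ _ _ hside,
      if_pos hB, if_pos hB, ih, ih [] [cur.reverse]]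
    simp
  · intro c rest _ _ hside hB ih cur acc
    rw [PySem.Chars.splitlines.go.eq_3 _ _ _ _ _ hside, PySem.Chars.splitlines.go.eq_3 _ _ _ _ _ hside,
      if_neg hB, if_neg hB, ih]

-- the partial current line becomes a prefix of the first produced line
theorem pv_go_cur (isB : Char → Bool) :
    ∀ (cs : List Char), cs ≠ [] → ∀ (cur : List Char),
      PySem.Chars.splitlines.go isB cs cur [] =
        (cur.reverse ++ (PySem.Chars.splitlines.go isB cs [] []).headD []) ::
          (PySem.Chars.splitlines.go isB cs [] []).tail := by
  intro cs
  refine PySem.Chars.splitlines.go.induct isB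
    (motive := fun cs _ _ => cs ≠ [] → ∀ cur,
      PySem.Chars.splitlines.go isB cs cur [] =
        (cur.reverse ++ (PySem.Chars.splitlines.go isB cs [] []).headD []) ::
          (PySem.Chars.splitlines.go isB cs [] []).tail) ?_ ?_ ?_ ?_ ?_ cs [] []
  · intro _ _ _ h; exact absurd rfl h
  · intro _ _ _ h; exact absurd rfl h
  · intro rest _ _ _ _ cur
    rw [PySem.Chars.splitlines.go.eq_2, PySem.Chars.splitlines.go.eq_2,
      pv_go_acc isB rest [] [cur.reverse], pv_go_acc isB rest [] [List.reverse []]]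
    simp
  · intro c rest _ _ hside hB _ _ cur
    rw [PySem.Chars.splitlines.go.eq_3 _ _ _ _ _ hside, PySem.Chars.splitlines.go.eq_3 _ _ _ _ _ hside,
      if_pos hB, if_pos hB, pv_go_acc isB rest [] [cur.reverse], pv_go_acc isB rest [] [List.reverse []]]
    simp
  · intro c rest _ _ hside hB ih _ cur
    rw [PySem.Chars.splitlines.go.eq_3 _ _ _ _ _ hside, PySem.Chars.splitlines.go.eq_3 _ _ _ _ _ hside,
      if_neg hB, if_neg hB]
    by_cases hr : rest = []
    · subst hr
      simp [PySem.Chars.splitlines.go.eq_1]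
    · rw [ih hr (c :: cur), ih hr [c]]
      simp

-- splitlines of a nonempty string is nonempty
theorem pv_go_ne_nil (isB : Char → Bool) :
    ∀ (cs cur : List Char) (acc : List (List Char)), cs ≠ [] ∨ acc ≠ [] →
      PySem.Chars.splitlines.go isB cs cur acc ≠ [] := by
  intro cs cur₀ acc₀ h₀
  refine PySem.Chars.splitlines.go.induct isB
    (motive := fun cs _ _ => ∀ cur acc, cs ≠ [] ∨ acc ≠ [] →
      PySem.Chars.splitlines.go isB cs cur acc ≠ []) ?_ ?_ ?_ ?_ ?_ cs [] [] cur₀ acc₀ h₀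
  · intro _ _ _ cur acc h
    have ha : acc ≠ [] := by
      rcases h with h | h
      · exact absurd rfl h
      · exact h
    by_cases hc : cur.isEmpty <;> simp [PySem.Chars.splitlines.go.eq_1, hc, ha]
  · intro _ _ _ cur acc h
    have ha : acc ≠ [] := by
      rcases h with h | h
      · exact absurd rfl h
      · exact h
    by_cases hc : cur.isEmpty <;> simp [PySem.Chars.splitlines.go.eq_1, hc, ha]
  · intro rest _ _ ih cur acc _
    rw [PySem.Chars.splitlines.go.eq_2]
    exact ih [] (cur.reverse :: acc) (Or.inr (by simp))
  · intro c rest _ _ hside hB ih cur acc _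
    rw [PySem.Chars.splitlines.go.eq_3 _ _ _ _ _ hside, if_pos hB]
    exact ih [] (cur.reverse :: acc) (Or.inr (by simp))
  · intro c rest _ _ hside hB ih cur acc h
    rw [PySem.Chars.splitlines.go.eq_3 _ _ _ _ _ hside, if_neg hB]
    by_cases hr : rest = []
    · subst hr
      have ha : acc ≠ [] ∨ True := Or.inr trivial
      by_cases hacc : acc = []
      · simp [PySem.Chars.splitlines.go.eq_1, hacc]
      · by_cases hc : (c :: cur).isEmpty <;> simp [PySem.Chars.splitlines.go.eq_1, hc, hacc]
    · exact ih (c :: cur) acc (Or.inl hr)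

-- B's character scan computes join sep (splitlines cs) on dom strings (generic break test)
theorem pv_bloop_go (isB : Char → Bool)
    (hDom : ∀ c, pvDomChar c = true → isB c = (c == '\n' || c == '\r'))
    (sep : List Char) :
    ∀ (cs : List Char), cs.all pvDomChar = true →
      pvBLoop sep cs = PySem.Chars.join sep (PySem.Chars.splitlines.go isB cs [] []) := by
  intro cs
  induction cs using pvBLoop.induct
  case case1 =>
    intro _
    simp [pvBLoop, PySem.Chars.splitlines.go.eq_1, PySem.Chars.join_nil]
  case case2 rest ih =>
    intro hall
    have hrest : rest.all pvDomChar = true := by simp_all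
    rw [PySem.Chars.splitlines.go.eq_2, pv_go_acc isB rest [] [List.reverse []]]
    by_cases hr : rest = []
    · subst hr
      simp [pvBLoop, PySem.Chars.splitlines.go.eq_1, PySem.Chars.join_singleton]
    · obtain ⟨g0, gs, hG⟩ := List.exists_cons_of_ne_nil (pv_go_ne_nil isB rest [] [] (Or.inl hr))
      rw [show pvBLoop sep ('\r' :: '\n' :: rest) = (if rest = [] then [] else sep) ++ pvBLoop sep rest from rfl,
        if_neg hr, ih hrest, hG]
      simp [PySem.Chars.join_cons_cons]
  case case3 rest hside ih =>
    intro hall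
    have hrest : rest.all pvDomChar = true := by simp_all
    have hB : isB '\r' = true := by
      rw [hDom '\r' (by decide)]; decide
    rw [PySem.Chars.splitlines.go.eq_3 _ _ _ _ _ (fun r h1 h2 => hside r h2), if_pos hB,
      pv_go_acc isB rest [] [List.reverse []]]
    by_cases hr : rest = []
    · subst hr
      simp [pvBLoop, PySem.Chars.splitlines.go.eq_1, PySem.Chars.join_singleton]
    · obtain ⟨g0, gs, hG⟩ := List.exists_cons_of_ne_nil (pv_go_ne_nil isB rest [] [] (Or.inl hr))
      have hstep : pvBLoop sep ('\r' :: rest) = (if rest = [] then [] else sep) ++ pvBLoop sep rest := by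
        cases rest with
        | nil => exact absurd rfl hr
        | cons c' rest' =>
          have hc' : ¬ c' = '\n' := fun h => hside rest' (by rw [h])
          simp [pvBLoop]
      rw [hstep, if_neg hr, ih hrest, hG]
      simp [PySem.Chars.join_cons_cons]
  case case4 rest ih =>
    intro hall
    have hrest : rest.all pvDomChar = true := by simp_all
    have hB : isB '\n' = true := by
      rw [hDom '\n' (by decide)]; decide
    rw [PySem.Chars.splitlines.go.eq_3 _ _ _ _ _ (fun r h1 _ => by cases h1), if_pos hB,
      pv_go_acc isB rest [] [List.reverse []]]
    by_cases hr : rest = []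
    · subst hr
      simp [pvBLoop, PySem.Chars.splitlines.go.eq_1, PySem.Chars.join_singleton]
    · obtain ⟨g0, gs, hG⟩ := List.exists_cons_of_ne_nil (pv_go_ne_nil isB rest [] [] (Or.inl hr))
      rw [show pvBLoop sep ('\n' :: rest) = (if rest = [] then [] else sep) ++ pvBLoop sep rest from rfl,
        if_neg hr, ih hrest, hG]
      simp [PySem.Chars.join_cons_cons]
  case case5 c rest hside hr13 hr10 ih =>
    intro hall
    have hdc : pvDomChar c = true := by simp_all
    have hrest : rest.all pvDomChar = true := by simp_all
    have hB : isB c = false := by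
      rw [hDom c hdc]
      simp only [Bool.or_eq_false_iff, beq_eq_false_iff_ne, ne_eq]
      exact ⟨hr10, hr13⟩
    have hstep : pvBLoop sep (c :: rest) = c :: pvBLoop sep rest := by
      cases rest with
      | nil => simp [pvBLoop]
      | cons c' rest' =>
        by_cases hc' : c = '\r' ∧ c' = '\n'
        · exact absurd hc'.1 hr13
        · simp [pvBLoop]
    rw [PySem.Chars.splitlines.go.eq_3 _ _ _ _ _ hside, hB, if_neg Bool.false_ne_true, hstep, ih hrest]
    by_cases hr : rest = []
    · subst hr
      simp [PySem.Chars.splitlines.go.eq_1, PySem.Chars.join_nil, PySem.Chars.join_singleton]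
    · obtain ⟨g0, gs, hG⟩ := List.exists_cons_of_ne_nil (pv_go_ne_nil isB rest [] [] (Or.inl hr))
      rw [pv_go_cur isB rest hr [c], hG]
      simp
      cases gs with
      | nil => simp [PySem.Chars.join_singleton]
      | cons g1 gs' => simp [PySem.Chars.join_cons_cons]

-- B's character scan computes join sep (splitlines cs) on dom strings
theorem pv_bloop_splitlines (sep : List Char) (cs : List Char) (h : cs.all pvDomChar = true) :
    pvBLoop sep cs = PySem.Chars.join sep (PySem.Chars.splitlines cs) := by
  unfold PySem.Chars.splitlines
  exact pv_bloop_go _ (fun c hc => pv_isB_dom c hc) sep cs h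

theorem pv_splitlines_ne_nil (cs : List Char) (h : cs ≠ []) :
    PySem.Chars.splitlines cs ≠ [] := by
  unfold PySem.Chars.splitlines
  exact pv_go_ne_nil _ cs [] [] (Or.inl h)

-- A's append-only loop over lines[1:] is the initial list followed by the mapped tail.
theorem pv_foldl_append_map {α β : Type} (f : α → β) :
    ∀ (l : List α) (init : List β),
      l.foldl (fun acc x => acc ++ [f x]) init = init ++ l.map f := by
  intro l
  induction l with
  | nil => intro init; simp
  | cons x xs ih => intro init; simp [List.foldl, ih]

-- A prefix glued onto the head of a join moves out in front.
theorem pv_join_head_append (sep p r : List Char) :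
    ∀ (rs : List (List Char)),
      PySem.Chars.join sep ((p ++ r) :: rs) = p ++ PySem.Chars.join sep (r :: rs) := by
  intro rs
  cases rs with
  | nil => simp [PySem.Chars.join_singleton]
  | cons y t => simp [PySem.Chars.join_cons_cons]

-- Joining indented lines with sep equals joining the raw lines with sep ++ indent.
theorem pv_join_map_indent (sep ind : List Char) :
    ∀ (rs : List (List Char)) (a : List Char),
      PySem.Chars.join sep (a :: rs.map (fun l => ind ++ l)) =
        PySem.Chars.join (sep ++ ind) (a :: rs) := by
  intro rs
  induction rs with
  | nil => intro a; simp
  | cons r t ih =>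
    intro a
    simp only [List.map_cons, PySem.Chars.join_cons_cons]
    rw [ih (ind ++ r), pv_join_head_append (sep ++ ind) ind r t]
    simp [List.append_assoc]

-- ===== VERDICT (by name: the statement is the Claim_ definition above) =====
theorem format_multiline_py_spec : Claim_equal_format_multiline_py := by
  intro tag message hdom
  have hdm : message.toList.all pvDomChar = true := by
    simp only [Dom_format_multiline_py, Bool.and_eq_true, pvDomStr] at hdom
    exact hdom.2
  unfold Spec_format_multiline_py format_multiline_py format_multiline_py_alt
  by_cases hnil : message.toList = []
  · simp [hnil, PySem.Chars.splitlines, PySem.Chars.splitlines.go.eq_1]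
  · obtain ⟨l0, ls, hL⟩ :=
      List.exists_cons_of_ne_nil (pv_splitlines_ne_nil message.toList hnil)
    simp only [hL, hnil, reduceCtorEq, if_false, List.headD, List.drop_succ_cons, List.drop_zero]
    rw [pv_foldl_append_map, pv_bloop_splitlines _ _ hdm, hL]
    simp only [List.singleton_append]
    rw [show '[' :: tag.toList ++ [']', ' '] ++ l0 = ('[' :: tag.toList ++ [']', ' ']) ++ l0 by simp,
      pv_join_head_append, pv_join_map_indent]
    simp
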